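-- pv_equiv track=rewrite | github.com/sasho132/softuni-courses | python_fundamentals_january_2022/text_processing/15_winning_ticket.py | side_check
-- ===== SOURCE A (Python) =====
-- def side_check(side, valid_symbols):
--     symbol = ''
--     counter = 0
--     for char in side:
--         if char not in valid_symbols:
--             if counter >= 6:
--                 break
--             counter = 0
--             symbol = char
--         else:
--             symbol = char
--             counter += 1
--     return symbol, counter
-- ===== SOURCE B (Python) =====
-- def side_check(side, valid_symbols):
--     # run-based scan: advance over maximal runs of equal validity instead of char by char
--     symbol, counter = '', 0
--     i, n = 0, len(side)
--     while i < n: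
--         is_valid = side[i] in valid_symbols
--         j = i
--         while j < n and (side[j] in valid_symbols) == is_valid:
--             j += 1
--         if is_valid:
--             symbol = side[j - 1]
--             counter += j - i
--         else:
--             if counter >= 6:
--                 break
--             symbol = side[j - 1]
--             counter = 0
--         i = j
--     return symbol, counter
-- ===== Notes on version B (the rewrite author's own statement) =====
-- stated objective: alternative
-- what changed: Replaces A's char-by-char state machine with a run-based two-pointer scan over maximal runs of equal validity: a valid run adds its length to the counter, an invalid run breaks if counter>=6 else resets, with symbol set to each run's last char.
import Mathlib
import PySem

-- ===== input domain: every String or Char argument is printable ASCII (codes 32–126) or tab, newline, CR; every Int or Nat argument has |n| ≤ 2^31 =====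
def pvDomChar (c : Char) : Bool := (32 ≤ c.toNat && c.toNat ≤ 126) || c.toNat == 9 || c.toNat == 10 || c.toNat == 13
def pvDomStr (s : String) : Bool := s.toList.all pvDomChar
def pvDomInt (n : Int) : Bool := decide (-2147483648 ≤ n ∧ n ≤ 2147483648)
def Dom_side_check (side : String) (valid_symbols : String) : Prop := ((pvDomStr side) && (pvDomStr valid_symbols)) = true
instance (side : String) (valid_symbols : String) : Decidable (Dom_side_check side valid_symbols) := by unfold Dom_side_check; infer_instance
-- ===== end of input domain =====

-- B replaces A's per-character state machine with a two-pointer scan over maximal runs (alternative decomposition, same cost); return values proved equal on all inputs.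

-- ===== PORT A =====
-- the for-loop of A with its (symbol, counter) state; break = stop returning current state
def pvSideLoop (p : Char → Bool) : List Char → String → Int → String × Int
  | [], symbol, counter => (symbol, counter)
  | c :: rest, symbol, counter =>
    if ¬ p c then
      if counter ≥ 6 then (symbol, counter)
      else pvSideLoop p rest (String.mk [c]) 0
    else pvSideLoop p rest (String.mk [c]) (counter + 1)

def side_check (side : String) (valid_symbols : String) : String × Int :=
  pvSideLoop (fun c => valid_symbols.toList.contains c) side.toList "" 0

-- ===== PORT B =====
-- B's inner while loop: take the maximal prefix of chars whose validity equals b, return (run, tail)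
def pvTakeRun (b : Bool) (p : Char → Bool) : List Char → List Char × List Char
  | [] => ([], [])
  | c :: rest =>
    if p c = b then
      let r := pvTakeRun b p rest
      (c :: r.1, r.2)
    else ([], c :: rest)

theorem pvTakeRun_len (b : Bool) (p : Char → Bool) :
    ∀ l : List Char, (pvTakeRun b p l).2.length ≤ l.length := by
  intro l
  induction l with
  | nil => simp [pvTakeRun]
  | cons c rest ih =>
    simp only [pvTakeRun]
    split
    · exact Nat.le_succ_of_le ih
    · simp

-- B's outer while loop: process one maximal run per step
def pvRunLoop (p : Char → Bool) : List Char → String → Int → String × Int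
  | [], symbol, counter => (symbol, counter)
  | c :: rest, symbol, counter =>
    let r := pvTakeRun (p c) p rest
    let last := r.1.getLastD c
    if p c then pvRunLoop p r.2 (String.mk [last]) (counter + 1 + r.1.length)
    else if counter ≥ 6 then (symbol, counter)
    else pvRunLoop p r.2 (String.mk [last]) 0
termination_by l => l.length
decreasing_by
  all_goals exact Nat.lt_succ_of_le (pvTakeRun_len _ _ _)

def side_check_alt (side : String) (valid_symbols : String) : String × Int :=
  pvRunLoop (fun c => valid_symbols.toList.contains c) side.toList "" 0

-- ===== PRECONDITION & SPEC =====
def Spec_side_check (side : String) (valid_symbols : String) (out : String × Int) : Prop := out = side_check_alt side valid_symbols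
instance (side : String) (valid_symbols : String) (out : String × Int) : Decidable (Spec_side_check side valid_symbols out) := by unfold Spec_side_check; infer_instance

-- ===== CLAIM (what is proved, stated in full; the proofs are below) =====
def Claim_equal_side_check : Prop := ∀ (side : String) (valid_symbols : String), Dom_side_check side valid_symbols → Spec_side_check side valid_symbols (side_check side valid_symbols)

-- ===== LEMMAS AND PROOFS =====

theorem pvGetLast_cons : ∀ (l : List Char) (d c : Char),
    (d :: l).getLast?.getD c = l.getLast?.getD d
  | [], d, c => by simp
  | e :: t, d, c => by
    rw [List.getLast?_cons_cons, pvGetLast_cons t e c, ← pvGetLast_cons t e d]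

-- a valid run: A's loop consumes it char by char, ending with symbol = last char, counter increased by its length
theorem pvSideLoop_valid_run (p : Char → Bool) :
    ∀ (l : List Char) (c : Char) (sym : String) (cnt : Int), p c = true →
      pvSideLoop p (c :: l) sym cnt =
        pvSideLoop p (pvTakeRun true p l).2
          (String.mk [(pvTakeRun true p l).1.getLastD c])
          (cnt + 1 + (pvTakeRun true p l).1.length) := by
  intro l
  induction l with
  | nil => intro c sym cnt hc; simp [pvSideLoop, pvTakeRun, hc]
  | cons d t ih =>
    intro c sym cnt hc
    by_cases hd : p d = true
    · rw [show pvSideLoop p (c :: d :: t) sym cnt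
            = pvSideLoop p (d :: t) (String.mk [c]) (cnt + 1) by simp [pvSideLoop, hc]]
      rw [ih d (String.mk [c]) (cnt + 1) hd]
      simp only [pvTakeRun, hd, if_pos rfl]
      have harith : cnt + 1 + 1 + ((pvTakeRun true p t).1.length : Int)
          = cnt + 1 + ((pvTakeRun true p t).1.length + 1 : Nat) := by push_cast; ring
      simp [harith, pvGetLast_cons]
    · simp [pvTakeRun, hd, pvSideLoop, hc]

-- an invalid run with counter < 6: A resets at each char, ending with symbol = last char, counter 0
theorem pvSideLoop_invalid_run (p : Char → Bool) :
    ∀ (l : List Char) (c : Char) (sym : String) (cnt : Int), p c = false → ¬ cnt ≥ 6 →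
      pvSideLoop p (c :: l) sym cnt =
        pvSideLoop p (pvTakeRun false p l).2
          (String.mk [(pvTakeRun false p l).1.getLastD c]) 0 := by
  intro l
  induction l with
  | nil => intro c sym cnt hc h6; simp [pvSideLoop, pvTakeRun, hc, h6]
  | cons d t ih =>
    intro c sym cnt hc h6
    by_cases hd : p d = true
    · simp [pvTakeRun, hd, pvSideLoop, hc, h6]
    · rw [show pvSideLoop p (c :: d :: t) sym cnt
            = pvSideLoop p (d :: t) (String.mk [c]) 0 by simp [pvSideLoop, hc, h6]]
      rw [ih d (String.mk [c]) 0 (by simpa using hd) (by norm_num)]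
      simp [pvTakeRun, hd, pvGetLast_cons]

theorem pvSideLoop_eq_pvRunLoop (p : Char → Bool) :
    ∀ (n : Nat) (l : List Char), l.length ≤ n → ∀ (sym : String) (cnt : Int),
      pvSideLoop p l sym cnt = pvRunLoop p l sym cnt := by
  intro n
  induction n with
  | zero =>
    intro l hl sym cnt
    have : l = [] := List.eq_nil_of_length_eq_zero (Nat.le_zero.mp hl)
    subst this; simp [pvSideLoop, pvRunLoop]
  | succ n ih =>
    intro l hl sym cnt
    match l with
    | [] => simp [pvSideLoop, pvRunLoop]
    | c :: rest =>
      have hrest : rest.length ≤ n := Nat.lt_succ_iff.mp (by simpa using hl)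
      rw [pvRunLoop]
      by_cases hc : p c = true
      · simp only [hc, if_pos rfl]
        rw [pvSideLoop_valid_run p rest c sym cnt hc]
        exact ih _ (le_trans (pvTakeRun_len _ _ _) hrest) _ _
      · have hc' : p c = false := by simpa using hc
        rw [if_neg (show ¬ p c = true by simp [hc'])]
        by_cases h6 : cnt ≥ 6
        · simp [pvSideLoop, hc', h6]
        · simp only [if_neg h6, hc']
          rw [pvSideLoop_invalid_run p rest c sym cnt hc' h6]
          exact ih _ (le_trans (pvTakeRun_len _ _ _) hrest) _ _

-- ===== VERDICT (by name: the statement is the Claim_ definition above) =====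
theorem side_check_spec : Claim_equal_side_check := by
  intro side valid_symbols _
  unfold Spec_side_check side_check side_check_alt
  exact pvSideLoop_eq_pvRunLoop _ side.toList.length _ (le_refl _) _ _
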